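-- pv_equiv track=rewrite | github.com/melcatwork/swarm-tm-backend | app/swarm/iac_serialiser.py | _serialise_summary
-- ===== SOURCE A (Python) =====
-- from typing import Dict, List, Any
--
-- def _serialise_summary(graph: Dict[str, Any]) -> str:
--     """Generate infrastructure summary by resource type."""
--     assets = graph.get('assets', [])
--
--     if not assets:
--         return 'INFRASTRUCTURE SUMMARY:\n  No assets found'
--
--     by_type: Dict[str, List[Dict]] = {}
--     for asset in assets:
--         asset_type = asset.get('type', 'unknown')
--         by_type.setdefault(asset_type, []).append(asset)
--
--     lines = ['INFRASTRUCTURE SUMMARY:']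
--     for rtype in sorted(by_type.keys()):
--         items = by_type[rtype]
--         lines.append(f'  {rtype}: {len(items)} resource(s)')
--
--     return '\n'.join(lines)
-- ===== SOURCE B (Python) =====
-- def _serialise_summary(graph):
--     """Generate infrastructure summary by resource type."""
--     assets = graph.get('assets', [])
--
--     if not assets:
--         return 'INFRASTRUCTURE SUMMARY:\n  No assets found'
--
--     types = sorted(asset.get('type', 'unknown') for asset in assets)
--
--     lines = ['INFRASTRUCTURE SUMMARY:']
--     prev = None
--     count = 0
--     for t in types:
--         if t == prev:
--             count += 1
--         else:
--             if count:
--                 lines.append(f'  {prev}: {count} resource(s)')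
--             prev = t
--             count = 1
--     lines.append(f'  {prev}: {count} resource(s)')
--     return '\n'.join(lines)
-- ===== Notes on version B (the rewrite author's own statement) =====
-- stated objective: alternative
-- what changed: Replaces grouping assets into a dict-of-lists and then sorting the keys by sorting the type names first and emitting counts in one linear run-length pass over the sorted list.
import Mathlib
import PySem

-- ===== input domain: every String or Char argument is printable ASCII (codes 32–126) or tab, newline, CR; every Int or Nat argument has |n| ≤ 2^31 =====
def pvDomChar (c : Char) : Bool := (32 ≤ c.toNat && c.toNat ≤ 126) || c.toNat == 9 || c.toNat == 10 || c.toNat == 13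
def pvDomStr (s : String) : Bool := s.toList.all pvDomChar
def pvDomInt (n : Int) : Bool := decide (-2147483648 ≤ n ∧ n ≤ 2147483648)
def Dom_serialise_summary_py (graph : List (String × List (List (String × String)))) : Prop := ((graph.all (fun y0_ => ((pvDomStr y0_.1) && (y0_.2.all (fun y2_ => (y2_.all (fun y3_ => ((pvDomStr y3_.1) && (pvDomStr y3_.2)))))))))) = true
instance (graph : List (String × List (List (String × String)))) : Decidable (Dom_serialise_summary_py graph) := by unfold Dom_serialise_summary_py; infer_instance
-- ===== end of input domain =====

-- B replaces A's group-into-a-dict-then-sort-the-keys by sort-the-type-names-first then one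
-- linear run-length pass; same output, similar cost (objective: alternative).


-- shared formatting/lookup helpers: the f-string '  {t}: {n} resource(s)' and asset.get('type', 'unknown')
def pvLine (t : String) (n : Int) : String := "  " ++ t ++ ": " ++ PySem.Int.toStr n ++ " resource(s)"
def pvAssetType (asset : List (String × String)) : String := (PySem.Dict.mk asset).getD "type" "unknown"

-- ===== PORT A =====
def serialise_summary_py (graph : List (String × List (List (String × String)))) : String :=
  let assets := (PySem.Dict.mk graph).getD "assets" []
  if assets = [] then "INFRASTRUCTURE SUMMARY:\n  No assets found"
  else
    let by_type : PySem.Dict String (List (List (String × String))) :=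
      List.foldl (fun d asset => d.modify (pvAssetType asset) [] (fun x => x ++ [asset]))
        PySem.Dict.empty assets
    let lines :=
      List.foldl (fun ls rtype => ls ++ [pvLine rtype (PySem.List.len (by_type.getD rtype []))])
        ["INFRASTRUCTURE SUMMARY:"] (PySem.List.sorted by_type.keys (fun k => k))
    PySem.Str.join "\n" lines

-- ===== PORT B =====
-- loop body of B's single run-length pass; state = (lines, prev, count)
def pvStep (st : List String × Option String × Int) (t : String) : List String × Option String × Int :=
  if some t = st.2.1 then (st.1, st.2.1, st.2.2 + 1)
  else ((if st.2.2 ≠ 0 then st.1 ++ [pvLine (st.2.1.getD "") st.2.2] else st.1), some t, 1)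

def serialise_summary_py_alt (graph : List (String × List (List (String × String)))) : String :=
  let assets := (PySem.Dict.mk graph).getD "assets" []
  if assets = [] then "INFRASTRUCTURE SUMMARY:\n  No assets found"
  else
    let types := PySem.List.sorted (assets.map pvAssetType) (fun k => k)
    let st := List.foldl pvStep (["INFRASTRUCTURE SUMMARY:"], none, 0) types
    PySem.Str.join "\n" (st.1 ++ [pvLine (st.2.1.getD "") st.2.2])

-- ===== PRECONDITION & SPEC =====
def Spec_serialise_summary_py (graph : List (String × List (List (String × String)))) (out : String) : Prop := out = serialise_summary_py_alt graph
instance (graph : List (String × List (List (String × String)))) (out : String) : Decidable (Spec_serialise_summary_py graph out) := by unfold Spec_serialise_summary_py; infer_instance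

-- ===== CLAIM (what is proved, stated in full; the proofs are below) =====
def Claim_equal_serialise_summary_py : Prop := ∀ (graph : List (String × List (List (String × String)))), Dom_serialise_summary_py graph → Spec_serialise_summary_py graph (serialise_summary_py graph)

-- ===== LEMMAS AND PROOFS =====

-- foldl of Set.add from an arbitrary accumulator, in terms of dedup
theorem pv_foldl_add (xs : List String) : ∀ (acc : List String),
    List.foldl PySem.Set.add acc xs
      = acc ++ (PySem.List.dedup xs).filter (fun y => !acc.contains y) := by
  induction xs with
  | nil => intro acc; simp [PySem.List.dedup, PySem.Set.ofList]
  | cons x xs ih =>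
    intro acc
    have hd : PySem.List.dedup (x :: xs)
        = List.foldl PySem.Set.add (PySem.Set.add [] x) xs := rfl
    have h2 : PySem.Set.add ([] : List String) x = [x] := by simp [PySem.Set.add]
    simp only [List.foldl_cons, hd, h2, ih]
    by_cases hx : acc.contains x
    · have hx' : x ∈ acc := by simpa using hx
      have h1 : PySem.Set.add acc x = acc := by simp [PySem.Set.add, hx']
      rw [h1]
      simp only [List.filter_append]
      congr 1
      rw [show List.filter (fun y => !acc.contains y) [x] = [] by simp [hx']]
      rw [List.filter_filter]
      simp only [List.nil_append]
      apply List.filter_congr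
      intro y _
      by_cases hyx : y = x
      · subst hyx; simp [hx']
      · simp [hyx]
    · have hx' : x ∉ acc := by simpa using hx
      have h1 : PySem.Set.add acc x = acc ++ [x] := by simp [PySem.Set.add, hx']
      rw [h1]
      simp only [List.filter_append, List.append_assoc]
      rw [show List.filter (fun y => !acc.contains y) [x] = [x] by simp [hx']]
      rw [List.filter_filter]
      congr 1
      rw [List.singleton_append]
      congr 1
      apply List.filter_congr
      intro y _
      by_cases hyx : y = x
      · subst hyx; simp
      · simp [hyx]

-- first-occurrence dedup of a cons
theorem pv_dedup_cons (x : String) (xs : List String) :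
    PySem.List.dedup (x :: xs) = x :: (PySem.List.dedup xs).filter (fun y => !(y == x)) := by
  have hd : PySem.List.dedup (x :: xs)
      = List.foldl PySem.Set.add (PySem.Set.add [] x) xs := rfl
  have h2 : PySem.Set.add ([] : List String) x = [x] := by simp [PySem.Set.add]
  rw [hd, h2, pv_foldl_add]
  rw [List.singleton_append]
  congr 1
  apply List.filter_congr
  intro y _
  by_cases hyx : y = x
  · subst hyx; simp
  · simp [hyx]

-- dedup of a ≤-sorted list is strictly increasing
theorem pv_dedup_pairwise_lt (s : List String) (h : s.Pairwise (· ≤ ·)) :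
    (PySem.List.dedup s).Pairwise (· < ·) := by
  induction s with
  | nil => simp [PySem.List.dedup, PySem.Set.ofList]
  | cons x xs ih =>
    rw [pv_dedup_cons]
    rcases List.pairwise_cons.mp h with ⟨hle, htail⟩
    refine List.Pairwise.cons ?_ ((ih htail).filter _)
    intro y hy
    rcases List.mem_filter.mp hy with ⟨hmem, hne⟩
    have hy' : y ∈ xs := (PySem.List.mem_dedup xs y).mp hmem
    have : y ≠ x := by simpa using hne
    exact lt_of_le_of_ne (hle y hy') (Ne.symm this)

-- B's run-length fold over a sorted tail, characterised by counts over the filtered dedup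
theorem pv_runs (s : List String) : ∀ (lines : List String) (p : String) (c : Int),
    0 < c → s.Pairwise (· ≤ ·) → (∀ t ∈ s, p ≤ t) →
    (List.foldl pvStep (lines, some p, c) s).1
        ++ [pvLine (((List.foldl pvStep (lines, some p, c) s).2.1).getD "")
              (List.foldl pvStep (lines, some p, c) s).2.2]
      = lines ++ pvLine p (c + s.count p)
          :: ((PySem.List.dedup s).filter (fun y => !(y == p))).map
               (fun t => pvLine t (s.count t)) := by
  induction s with
  | nil => intro lines p c hc hp hle; simp [PySem.List.dedup, PySem.Set.ofList]
  | cons t ts ih =>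
    intro lines p c hc hp hle
    rcases List.pairwise_cons.mp hp with ⟨hts, htail⟩
    by_cases htp : t = p
    · subst htp
      have hstep : pvStep (lines, some t, c) t = (lines, some t, c + 1) := by
        simp [pvStep]
      rw [List.foldl_cons, hstep, ih lines t (c + 1) (by omega) htail hts]
      rw [pv_dedup_cons]
      congr 1
      congr 1
      · rw [List.count_cons_self]
        congr 1
        push_cast
        ring
      · rw [List.filter_cons]
        simp only [beq_self_eq_true, Bool.not_true]
        rw [if_neg (by simp)]
        rw [List.filter_filter]
        rw [show (fun (y : String) => !(y == t) && !(y == t)) = (fun y => !(y == t)) by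
          funext y; cases h : (y == t) <;> simp]
        apply List.map_congr_left
        intro y hy
        rcases List.mem_filter.mp hy with ⟨hmem, hne⟩
        have hty : (t == y) = false := by
          simp only [beq_eq_decide] at *; simp at hne ⊢; exact fun h => hne h.symm
        simp [List.count_cons, hty]
    · have hptle : p ≤ t := hle t (List.mem_cons_self ..)
      have hpt : p < t := lt_of_le_of_ne hptle (fun h => htp h.symm)
      have hstep : pvStep (lines, some p, c) t
          = (lines ++ [pvLine p c], some t, 1) := by
        simp [pvStep, htp]
        intro h; omega
      have hlets : ∀ y ∈ ts, t ≤ y := fun y hy => hts y hy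
      have hplt : ∀ y ∈ ts, p < y := fun y hy => lt_of_lt_of_le hpt (hlets y hy)
      have hcount : (t :: ts).count p = 0 := by
        rw [List.count_eq_zero]
        intro hmem
        rcases List.mem_cons.mp hmem with h | h
        · exact htp h.symm
        · exact absurd rfl (ne_of_gt (hplt p h))
      rw [List.foldl_cons, hstep, ih (lines ++ [pvLine p c]) t 1 one_pos htail hlets]
      rw [List.append_assoc, List.singleton_append]
      congr 1
      rw [hcount]
      congr 1
      · norm_num
      rw [pv_dedup_cons, List.filter_cons]
      rw [if_pos (by simpa using htp)]
      rw [show List.filter (fun y => !(y == p)) (List.filter (fun y => !(y == t)) (PySem.List.dedup ts))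
            = List.filter (fun y => !(y == t)) (PySem.List.dedup ts) from
          List.filter_eq_self.mpr (by
            intro y hy
            rcases List.mem_filter.mp hy with ⟨hmem, _⟩
            have : y ∈ ts := (PySem.List.mem_dedup ts y).mp hmem
            simpa using ne_of_gt (hplt y this))]
      rw [List.map_cons]
      congr 1
      · rw [List.count_cons_self]; congr 1; push_cast; ring
      · apply List.map_congr_left
        intro y hy
        rcases List.mem_filter.mp hy with ⟨hmem, hne⟩
        have hty : (t == y) = false := by
          simp only [beq_eq_decide] at *; simp at hne ⊢; exact fun h => hne h.symm
        simp [List.count_cons, hty]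

-- A's dict of groups: its key list and each group
theorem pv_keys (assets : List (List (String × String))) :
    (List.foldl (fun d asset => d.modify (pvAssetType asset) [] (fun x => x ++ [asset]))
        PySem.Dict.empty assets).keys = PySem.List.dedup (assets.map pvAssetType) :=
  PySem.Dict.keys_foldl_modify_key assets pvAssetType []
    (fun _ a => (fun x => x ++ [a])) PySem.Dict.empty

theorem pv_getD (assets : List (List (String × String))) (r : String) :
    (List.foldl (fun d asset => d.modify (pvAssetType asset) [] (fun x => x ++ [asset]))
        PySem.Dict.empty assets).getD r [] = assets.filter (fun a => pvAssetType a == r) := by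
  have h0 := PySem.Dict.getD_foldl_modify_append (assets.map (fun a => (pvAssetType a, a)))
    PySem.Dict.empty r
  rw [List.foldl_map] at h0
  rw [h0, PySem.Dict.getD_empty, List.filter_map, List.map_map]
  simp [Function.comp_def]

theorem pv_len_group (assets : List (List (String × String))) (r : String) :
    PySem.List.len (assets.filter (fun a => pvAssetType a == r))
      = ((assets.map pvAssetType).count r : Int) := by
  rw [PySem.List.len_eq, List.count_eq_countP, List.countP_map, ← List.countP_eq_length_filter]
  simp [Function.comp_def]

-- ===== VERDICT (by name: the statement is the Claim_ definition above) =====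
theorem serialise_summary_py_spec : Claim_equal_serialise_summary_py := by
  intro graph _hdom
  unfold Spec_serialise_summary_py
  by_cases h : (PySem.Dict.mk graph).getD "assets" ([] : List (List (String × String))) = []
  · simp [serialise_summary_py, serialise_summary_py_alt, h]
  · set assets := (PySem.Dict.mk graph).getD "assets" ([] : List (List (String × String))) with hassets
    set types0 := assets.map pvAssetType with htypes0
    set s := PySem.List.sorted types0 (fun k => k) with hs
    have hsnil : s ≠ [] := by
      rw [hs, Ne, PySem.List.sorted_eq_nil_iff, htypes0]
      simpa using h
    obtain ⟨t, ts, heq⟩ := List.exists_cons_of_ne_nil hsnil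
    have hsp : s.Pairwise (· ≤ ·) := by
      have := PySem.List.sorted_pairwise types0 (fun k => k)
      simpa [hs] using this
    have hts : ∀ y ∈ ts, t ≤ y := by
      have h' := hsp; rw [heq] at h'; exact (List.pairwise_cons.mp h').1
    have htail : ts.Pairwise (· ≤ ·) := by
      have h' := hsp; rw [heq] at h'; exact (List.pairwise_cons.mp h').2
    have hfun : (fun rtype => pvLine rtype (PySem.List.len
          ((List.foldl (fun d asset => d.modify (pvAssetType asset) [] (fun x => x ++ [asset]))
            PySem.Dict.empty assets).getD rtype [])))
        = (fun r => pvLine r ((types0.count r : Int))) := by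
      funext r
      rw [pv_getD assets r, pv_len_group assets r, htypes0]
    have hA : serialise_summary_py graph
        = PySem.Str.join "\n" ("INFRASTRUCTURE SUMMARY:"
            :: (PySem.List.sorted (PySem.List.dedup types0) (fun k => k)).map
                 (fun r => pvLine r ((types0.count r : Int)))) := by
      simp only [serialise_summary_py]
      rw [← hassets, if_neg h, pv_keys assets, PySem.List.foldl_append_singleton_eq_map, hfun,
        ← htypes0, List.singleton_append]
    have hstep0 : pvStep (["INFRASTRUCTURE SUMMARY:"], none, 0) t
        = (["INFRASTRUCTURE SUMMARY:"], some t, 1) := by simp [pvStep]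
    have hB : serialise_summary_py_alt graph
        = PySem.Str.join "\n" ("INFRASTRUCTURE SUMMARY:"
            :: pvLine t (1 + (ts.count t : Int))
            :: ((PySem.List.dedup ts).filter (fun y => !(y == t))).map
                 (fun y => pvLine y ((ts.count y : Int)))) := by
      simp only [serialise_summary_py_alt]
      rw [← hassets, if_neg h, ← htypes0, ← hs, heq, List.foldl_cons, hstep0,
        pv_runs ts _ t 1 one_pos htail hts, List.singleton_append]
    rw [hA, hB]
    have hperm : (PySem.List.dedup s).Perm (PySem.List.dedup types0) :=
      (List.perm_ext_iff_of_nodup (PySem.List.nodup_dedup s) (PySem.List.nodup_dedup types0)).mpr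
        (by
          intro a
          rw [PySem.List.mem_dedup, PySem.List.mem_dedup]
          exact (PySem.List.sorted_perm types0 (fun k => k) false).mem_iff)
    have hsd : PySem.List.sorted (PySem.List.dedup types0) (fun k => k) = PySem.List.dedup s :=
      PySem.List.sorted_eq_of_perm_of_pairwise_lt _ _ _ hperm
        (by simpa using pv_dedup_pairwise_lt s hsp)
    have hcnt : ∀ y, types0.count y = s.count y :=
      fun y => ((PySem.List.sorted_perm types0 (fun k => k) false).count_eq y).symm
    rw [hsd, heq, pv_dedup_cons, List.map_cons]
    have hhead : pvLine t ((types0.count t : Int)) = pvLine t (1 + (ts.count t : Int)) := by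
      rw [hcnt t, heq, List.count_cons_self]
      congr 1
      push_cast
      omega
    have htailmap :
        List.map (fun r => pvLine r ((types0.count r : Int)))
            ((PySem.List.dedup ts).filter (fun y => !(y == t)))
          = List.map (fun y => pvLine y ((ts.count y : Int)))
            ((PySem.List.dedup ts).filter (fun y => !(y == t))) := by
      apply List.map_congr_left
      intro y hy
      rcases List.mem_filter.mp hy with ⟨hmem, hne⟩
      have hty : (t == y) = false := by
        simp only [beq_eq_decide] at *; simp at hne ⊢; exact fun hh => hne hh.symm
      rw [hcnt y, heq]
      simp [List.count_cons, hty]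
    rw [hhead, htailmap]
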